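-- pv_equiv track=rewrite | github.com/d-najd/tetris-ai | AIFields.py | calHolesAboveEPiece
-- ===== SOURCE A (Python) =====
-- def calHolesAboveEPiece(board, pieceAboveMultiplier):
--     # TODO test if this works
--     score = 0
--     ignorePieceAboveMultiplier = False
--     if pieceAboveMultiplier == 0:
--         ignorePieceAboveMultiplier = True
--     for x in range(0, len(board[0])):
--         piecesAbove = 0
--         for y in range(0, len(board) - 1):
--             if piecesAbove != 0:
--                 if board[y][x] == 0:
--                     if not ignorePieceAboveMultiplier:
--                         score -= piecesAbove * pieceAboveMultiplier
--                     else: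
--                         score -= 1
--                 else:
--                     piecesAbove += 1
--             elif board[y][x] != 0:
--                 piecesAbove += 1
--     return score
-- ===== SOURCE B (Python) =====
-- def calHolesAboveEPiece(board, pieceAboveMultiplier):
--     # Suffix-table decomposition: per column count empty cells below each
--     # filled cell via a holes-below table, instead of A's running counter.
--     score = 0
--     n = len(board) - 1
--     for x in range(len(board[0])):
--         col = [board[y][x] for y in range(n)]
--         emptyBelow = [0] * (n + 1)
--         for y in range(n - 1, -1, -1):
--             emptyBelow[y] = emptyBelow[y + 1] + (1 if col[y] == 0 else 0)
--         if pieceAboveMultiplier != 0: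
--             t = sum(emptyBelow[y + 1] for y in range(n) if col[y] != 0)
--             score -= t * pieceAboveMultiplier
--         else:
--             first = next((y for y in range(n) if col[y] != 0), None)
--             if first is not None:
--                 score -= emptyBelow[first]
--     return score
-- ===== Notes on version B (the rewrite author's own statement) =====
-- stated objective: alternative
-- what changed: Replaces A's running piecesAbove counter with a per-column suffix table of empty-cells-below, then sums the table at filled cells (and, for multiplier 0, reads it at the first filled cell), instead of A's single forward pass with branch-guarded decrements.
import Mathlib
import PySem

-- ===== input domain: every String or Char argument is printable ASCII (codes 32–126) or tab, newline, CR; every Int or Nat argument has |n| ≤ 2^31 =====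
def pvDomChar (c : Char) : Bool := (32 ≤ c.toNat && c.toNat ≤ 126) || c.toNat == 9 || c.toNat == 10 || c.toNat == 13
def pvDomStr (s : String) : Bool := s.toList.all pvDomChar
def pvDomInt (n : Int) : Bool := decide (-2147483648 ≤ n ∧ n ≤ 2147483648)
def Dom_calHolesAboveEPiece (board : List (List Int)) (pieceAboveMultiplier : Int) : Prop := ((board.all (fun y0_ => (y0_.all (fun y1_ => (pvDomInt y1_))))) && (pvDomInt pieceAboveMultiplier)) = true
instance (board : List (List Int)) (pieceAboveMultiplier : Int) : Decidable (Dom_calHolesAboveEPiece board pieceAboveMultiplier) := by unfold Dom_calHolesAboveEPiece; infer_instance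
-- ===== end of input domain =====

-- B replaces A's running-counter pass with a suffix-table (holes-below) decomposition; objective: alternative (same cost).

-- ===== PORT A =====
def calHolesAboveEPiece (board : List (List Int)) (pieceAboveMultiplier : Int) : Int :=
  let ignorePieceAboveMultiplier : Bool := pieceAboveMultiplier == 0
  (List.range (board.headD []).length).foldl (fun score x =>
    ((List.range (board.length - 1)).foldl (fun (sp : Int × Int) y =>
      if sp.2 ≠ 0 then
        if (board.getD y []).getD x 0 == 0 then
          if ¬ ignorePieceAboveMultiplier then (sp.1 - sp.2 * pieceAboveMultiplier, sp.2)
          else (sp.1 - 1, sp.2)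
        else (sp.1, sp.2 + 1)
      else if (board.getD y []).getD x 0 ≠ 0 then (sp.1, sp.2 + 1)
      else sp) (score, 0)).1) 0

-- ===== PORT B =====
-- emptyBelow suffix table, built back-to-front (index y ↦ # empty cells at rows y..n-1)
def pvEbTable : List Int → List Int
  | [] => [0]
  | v :: rest =>
    let t := pvEbTable rest
    (t.headD 0 + (if v == 0 then 1 else 0)) :: t

-- sum of emptyBelow[y+1] over filled cells y (col walked with the table's tail)
def pvWeighted : List Int → List Int → Int
  | v :: col, e :: eb => (if v ≠ 0 then e else 0) + pvWeighted col eb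
  | _, _ => 0

-- emptyBelow[first] for the first filled cell, 0 if none
def pvFirstHole : List Int → List Int → Int
  | v :: col, e :: eb => if v ≠ 0 then e else pvFirstHole col eb
  | _, _ => 0

def calHolesAboveEPiece_alt (board : List (List Int)) (pieceAboveMultiplier : Int) : Int :=
  let n := board.length - 1
  (List.range (board.headD []).length).foldl (fun score x =>
    let col := (List.range n).map (fun y => (board.getD y []).getD x 0)
    let eb := pvEbTable col
    if pieceAboveMultiplier ≠ 0 then
      score - (pvWeighted col eb.tail) * pieceAboveMultiplier
    else
      score - pvFirstHole col eb) 0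

-- ===== PRECONDITION & SPEC =====
-- Pre_ excludes exactly the inputs where Python A raises IndexError: an empty board
-- (len(board[0])), or a row before the last one shorter than row 0.
def Pre_calHolesAboveEPiece (board : List (List Int)) (pieceAboveMultiplier : Int) : Prop :=
  board ≠ [] ∧ ∀ r ∈ board.dropLast, (board.headD []).length ≤ r.length

instance (board : List (List Int)) (pieceAboveMultiplier : Int) : Decidable (Pre_calHolesAboveEPiece board pieceAboveMultiplier) := by unfold Pre_calHolesAboveEPiece; infer_instance

def pvWitness_calHolesAboveEPiece : List (List Int) × Int := ([[1, 0], [0, 0], [0, 0]], 2)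

def Spec_calHolesAboveEPiece (board : List (List Int)) (pieceAboveMultiplier : Int) (out : Int) : Prop := out = calHolesAboveEPiece_alt board pieceAboveMultiplier
instance (board : List (List Int)) (pieceAboveMultiplier : Int) (out : Int) : Decidable (Spec_calHolesAboveEPiece board pieceAboveMultiplier out) := by unfold Spec_calHolesAboveEPiece; infer_instance

-- ===== CLAIM (what is proved, stated in full; the proofs are below) =====
def Claim_equal_calHolesAboveEPiece : Prop := ∀ (board : List (List Int)) (pieceAboveMultiplier : Int), Dom_calHolesAboveEPiece board pieceAboveMultiplier → Pre_calHolesAboveEPiece board pieceAboveMultiplier → Spec_calHolesAboveEPiece board pieceAboveMultiplier (calHolesAboveEPiece board pieceAboveMultiplier)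

-- ===== LEMMAS AND PROOFS =====

-- A's inner-loop step, named so the induction can treat it opaquely (defeq to the port's lambda)
def pvStepA (M : Int) (f : Nat → Int) (sp : Int × Int) (y : Nat) : Int × Int :=
  if sp.2 ≠ 0 then
    if f y == 0 then
      if ¬ (M == 0) then (sp.1 - sp.2 * M, sp.2)
      else (sp.1 - 1, sp.2)
    else (sp.1, sp.2 + 1)
  else if f y ≠ 0 then (sp.1, sp.2 + 1)
  else sp

def pvZeros (c : List Int) : Int := (c.countP (fun v => v == 0) : Int)

def pvPairs : List Int → Int
  | [] => 0
  | v :: c => (if v ≠ 0 then pvZeros c else 0) + pvPairs c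

def pvFH : List Int → Int
  | [] => 0
  | v :: c => if v ≠ 0 then pvZeros c else pvFH c

theorem pvZeros_cons (v : Int) (c : List Int) :
    pvZeros (v :: c) = (if v = 0 then 1 else 0) + pvZeros c := by
  simp [pvZeros, List.countP_cons]
  by_cases h : v = 0 <;> simp [h]; ring

theorem pvEbTable_eq (c : List Int) : pvEbTable c = pvZeros c :: (pvEbTable c).tail := by
  induction c with
  | nil => simp [pvEbTable, pvZeros]
  | cons v c ih =>
    have hhead : (pvEbTable c).headD 0 = pvZeros c := by rw [ih]; rfl
    simp only [pvEbTable, hhead, pvZeros_cons, List.tail_cons]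
    by_cases h : v = 0 <;> simp [h]; ring_nf

theorem pvWeighted_eq (c : List Int) : pvWeighted c (pvEbTable c).tail = pvPairs c := by
  induction c with
  | nil => simp [pvWeighted, pvPairs]
  | cons v c ih =>
    have h : (pvEbTable (v :: c)).tail = pvZeros c :: (pvEbTable c).tail := by
      simp only [pvEbTable, List.tail_cons]; exact pvEbTable_eq c
    rw [h, pvWeighted, ih, pvPairs]

theorem pvFirstHole_eq (c : List Int) : pvFirstHole c (pvEbTable c) = pvFH c := by
  induction c with
  | nil => simp [pvFirstHole, pvFH]
  | cons v c ih =>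
    rw [pvEbTable_eq (v :: c)]
    simp only [pvEbTable, List.tail_cons] at *
    rw [pvFirstHole, pvFH]
    by_cases h : v = 0
    · simp [h, ih]
    · simp [h, pvZeros_cons]

-- invariant of A's inner loop: p counts filled cells seen so far (nonnegative)
theorem pvFoldA (M : Int) (f : Nat → Int) (l : List Nat) (s p : Int) (hp0 : 0 ≤ p) :
    ((l.foldl (pvStepA M f) (s, p)).1) =
      s - (if M = 0 then (if p = 0 then pvFH (l.map f) else pvZeros (l.map f))
           else M * (p * pvZeros (l.map f) + pvPairs (l.map f))) := by
  induction l generalizing s p with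
  | nil => simp [pvZeros, pvFH, pvPairs]
  | cons y l ih =>
    rw [List.map_cons, List.foldl_cons]
    by_cases hM : M = 0 <;> by_cases hp : p = 0 <;> by_cases hv : f y = 0
    · have hstep : pvStepA M f (s, p) y = (s, p) := by simp [pvStepA, hp, hv]
      rw [hstep, ih s p hp0]
      simp [hM, hp, hv, pvFH]
    · have hstep : pvStepA M f (s, p) y = (s, p + 1) := by simp [pvStepA, hp, hv]
      rw [hstep, ih s (p + 1) (by omega)]
      have h1 : p + 1 ≠ 0 := by omega
      simp [hM, hp, hv, h1, pvFH]
    · have hstep : pvStepA M f (s, p) y = (s - 1, p) := by simp [pvStepA, hM, hp, hv]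
      rw [hstep, ih (s - 1) p hp0]
      simp [hM, hp, hv, pvZeros_cons]
      ring
    · have hstep : pvStepA M f (s, p) y = (s, p + 1) := by simp [pvStepA, hp, hv]
      rw [hstep, ih s (p + 1) (by omega)]
      have h1 : p + 1 ≠ 0 := by omega
      simp [hM, hp, hv, h1, pvZeros_cons]
    · have hstep : pvStepA M f (s, p) y = (s, p) := by simp [pvStepA, hp, hv]
      rw [hstep, ih s p hp0]
      simp [hM, hp, hv, pvZeros_cons, pvPairs]
    · have hstep : pvStepA M f (s, p) y = (s, p + 1) := by simp [pvStepA, hp, hv]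
      rw [hstep, ih s (p + 1) (by omega)]
      simp [hM, hp, hv, pvZeros_cons, pvPairs]
      try ring
    · have hstep : pvStepA M f (s, p) y = (s - p * M, p) := by simp [pvStepA, hM, hp, hv]
      rw [hstep, ih (s - p * M) p hp0]
      simp [hM, hp, hv, pvZeros_cons, pvPairs]
      ring
    · have hstep : pvStepA M f (s, p) y = (s, p + 1) := by simp [pvStepA, hp, hv]
      rw [hstep, ih s (p + 1) (by omega)]
      simp [hM, hp, hv, pvZeros_cons, pvPairs]
      ring

-- ===== VERDICT (by name: the statement is the Claim_ definition above) =====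
theorem calHolesAboveEPiece_spec : Claim_equal_calHolesAboveEPiece := by
  intro board M _ _
  unfold Spec_calHolesAboveEPiece calHolesAboveEPiece calHolesAboveEPiece_alt
  show (List.range (board.headD []).length).foldl
      (fun score x => ((List.range (board.length - 1)).foldl
          (pvStepA M fun y => (board.getD y []).getD x 0) (score, 0)).1) 0
    = (List.range (board.headD []).length).foldl
      (fun score x =>
        if M ≠ 0 then
          score - pvWeighted ((List.range (board.length - 1)).map fun y => (board.getD y []).getD x 0)
              (pvEbTable ((List.range (board.length - 1)).map fun y => (board.getD y []).getD x 0)).tail * M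
        else
          score - pvFirstHole ((List.range (board.length - 1)).map fun y => (board.getD y []).getD x 0)
              (pvEbTable ((List.range (board.length - 1)).map fun y => (board.getD y []).getD x 0))) 0
  congr 1
  funext score x
  rw [pvFoldA M (fun y => (board.getD y []).getD x 0) (List.range (board.length - 1)) score 0 (by omega)]
  by_cases hM : M = 0
  · simp [hM, pvFirstHole_eq]
  · simp [hM, pvWeighted_eq]
    ring
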